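-- pv_equiv track=rewrite | github.com/xyjxg2024/fucking-python-code | 数字写一个直角三角形.py | generate_triangle
-- ===== SOURCE A (Python) =====
-- def generate_triangle(n):
--     triangle = []  # 初始化一个空列表，用于存储每一行的数字字符串
--     num = 1        # 初始化数字从1开始
--     for i in range(n, 0, -1):  # 外层循环，从 n 到 1 递减
--         line = ''  # 初始化当前行的字符串为空
--         for j in range(i):  # 内层循环，控制当前行的数字个数
--             line += f'{num:02}'  # 将当前数字格式化为两位数，不足两位前面补零，并添加到当前行字符串中
--             num += 1  # 数字递增
--         triangle.append(line)  # 将当前行字符串添加到三角形列表中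
--     return '\n'.join(triangle)  # 将所有行用换行符连接成一个字符串返回
-- ===== SOURCE B (Python) =====
-- def generate_triangle(n):
--     m = max(n, 0)
--     total = m * (m + 1) // 2
--     nums = [f'{k:02}' for k in range(1, total + 1)]
--     rows = []
--     start = 0
--     for length in range(n, 0, -1):
--         rows.append(''.join(nums[start:start + length]))
--         start += length
--     return '\n'.join(rows)
-- ===== Notes on version B (the rewrite author's own statement) =====
-- stated objective: alternative
-- what changed: Token generation is separated from row partitioning: B precomputes the flat list of all n*(n+1)/2 formatted numbers in one pass, then partitions it into rows by triangular-offset slicing, instead of A's single interleaved counting loop with per-character string concatenation.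
import Mathlib
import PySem

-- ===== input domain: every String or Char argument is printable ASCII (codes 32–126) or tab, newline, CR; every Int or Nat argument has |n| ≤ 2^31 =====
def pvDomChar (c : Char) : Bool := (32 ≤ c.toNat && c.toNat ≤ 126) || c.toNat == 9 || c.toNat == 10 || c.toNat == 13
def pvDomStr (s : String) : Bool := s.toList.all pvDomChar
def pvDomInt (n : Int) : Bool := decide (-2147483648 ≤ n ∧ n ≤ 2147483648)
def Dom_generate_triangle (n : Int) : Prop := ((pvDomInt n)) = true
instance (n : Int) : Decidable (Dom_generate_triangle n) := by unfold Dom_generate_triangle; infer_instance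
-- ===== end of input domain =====

-- B separates token generation (one flat list of all formatted numbers) from row partitioning
-- (triangular-offset slicing) instead of A's interleaved counting loop; objective: alternative.

-- ===== PORT A =====
-- f'{k:02}' for an int k = str(k).zfill(2) (helper shared by both ports)
def pad02 (k : Int) : List Char := PySem.Chars.zfill (PySem.Int.toChars k) 2

def generate_triangle (n : Int) : String :=
  let st := (PySem.List.pyRange n 0 (-1)).foldl
    (fun (acc : List (List Char) × Int) i =>
      let inner := (PySem.List.pyRange 0 i 1).foldl
        (fun (p : List Char × Int) _ => (p.1 ++ pad02 p.2, p.2 + 1)) ([], acc.2)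
      (acc.1 ++ [inner.1], inner.2)) ([], 1)
  String.ofList (PySem.Chars.join ['\n'] st.1)

-- ===== PORT B =====
def generate_triangle_alt (n : Int) : String :=
  let m := max n 0
  let total := PySem.Int.floordiv (m * (m + 1)) 2
  let nums := (PySem.List.pyRange 1 (total + 1) 1).map pad02
  let st := (PySem.List.pyRange n 0 (-1)).foldl
    (fun (acc : List (List Char) × Int) len =>
      (acc.1 ++ [PySem.Chars.join [] (PySem.List.slice nums (some acc.2) (some (acc.2 + len)))],
       acc.2 + len)) ([], 0)
  String.ofList (PySem.Chars.join ['\n'] st.1)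

-- ===== PRECONDITION & SPEC =====
def Spec_generate_triangle (n : Int) (out : String) : Prop := out = generate_triangle_alt n
instance (n : Int) (out : String) : Decidable (Spec_generate_triangle n out) := by unfold Spec_generate_triangle; infer_instance

-- ===== CLAIM (what is proved, stated in full; the proofs are below) =====
def Claim_equal_generate_triangle : Prop := ∀ (n : Int), Dom_generate_triangle n → Spec_generate_triangle n (generate_triangle n)

-- ===== LEMMAS AND PROOFS =====

-- the characters of a row of length L whose first number is v
def chunk (v : Int) : Nat → List Char
  | 0 => []
  | L + 1 => pad02 v ++ chunk (v + 1) L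

-- the triangle rows for remaining row lengths i, i-1, …, 1 with next number v
def rowsFrom : Nat → Int → List (List Char)
  | 0, _ => []
  | i + 1, v => chunk v (i + 1) :: rowsFrom i (v + (i + 1))

def tri (i : Nat) : Nat := i * (i + 1) / 2

theorem inner_fold_eq {α : Type} (l : List α) (s : List Char) (v : Int) :
    l.foldl (fun (p : List Char × Int) _ => (p.1 ++ pad02 p.2, p.2 + 1)) (s, v)
      = (s ++ chunk v l.length, v + l.length) := by
  induction l generalizing s v with
  | nil => simp [chunk]
  | cons a t ih => simp [List.foldl, ih, chunk]; omega

theorem tri_succ (m : Nat) : tri (m+1) = (m+1) + tri m := by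
  obtain ⟨k, hk⟩ := Nat.even_mul_succ_self m
  have h : (m+1) * (m+1+1) = 2*(m+1) + m*(m+1) := by ring
  unfold tri; omega

-- A's outer loop over lengths i, …, 1 starting at number v produces rowsFrom i v
theorem outerA_eq (i : Nat) (acc : List (List Char)) (v : Int) :
    (PySem.List.pyRange (i : Int) 0 (-1)).foldl
      (fun (acc : List (List Char) × Int) j =>
        let inner := (PySem.List.pyRange 0 j 1).foldl
          (fun (p : List Char × Int) _ => (p.1 ++ pad02 p.2, p.2 + 1)) ([], acc.2)
        (acc.1 ++ [inner.1], inner.2)) (acc, v)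
      = (acc ++ rowsFrom i v, v + (tri i : Int)) := by
  induction i generalizing acc v with
  | zero => simp [PySem.List.pyRange_neg_one_eq_nil, rowsFrom, tri]
  | succ m ih =>
    rw [PySem.List.pyRange_neg_one_cons (by exact_mod_cast Nat.succ_pos m)]
    have hm : ((m + 1 : Nat) : Int) - 1 = (m : Int) := by push_cast; ring
    simp only [List.foldl, hm]
    rw [inner_fold_eq]
    have hlen : (PySem.List.pyRange 0 ((m+1 : Nat) : Int) 1).length = m + 1 := by
      simp [PySem.List.length_pyRange_one]
    rw [hlen, ih]
    simp only [Prod.mk.injEq]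
    refine ⟨by simp [rowsFrom], by push_cast [tri_succ]; omega⟩

theorem join_empty_flatten (l : List (List Char)) : PySem.Chars.join [] l = l.flatten := by
  induction l with
  | nil => rfl
  | cons a t ih =>
    cases t with
    | nil => simp [PySem.Chars.join_singleton]
    | cons b r => rw [PySem.Chars.join_cons_cons]; simp_all

theorem flatten_range'_chunk (i : Nat) : ∀ s : Nat,
    ((List.range' s i).map (fun k : Nat => pad02 (1 + (k : Int)))).flatten = chunk ((s : Int) + 1) i := by
  induction i with
  | zero => intro s; simp [chunk]
  | succ m ih =>
    intro s
    rw [List.range'_succ]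
    simp only [List.map_cons, List.flatten_cons, chunk]
    rw [ih (s + 1)]
    have h1 : (1 : Int) + (s : Int) = (s : Int) + 1 := by ring
    have h2 : ((s + 1 : Nat) : Int) + 1 = (s : Int) + 1 + 1 := by push_cast; ring
    rw [h1, h2]

-- ''.join(nums[s:s+i]) of B's flat token list is the row of length i starting at number s+1
theorem sliceJoin (T s i : Nat) (h : s + i ≤ T) :
    PySem.Chars.join []
        (PySem.List.slice (((PySem.List.pyRange 1 ((T : Int) + 1) 1).map pad02))
          (some (s : Int)) (some ((s : Int) + (i : Int))))
      = chunk ((s : Int) + 1) i := by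
  rw [PySem.List.slice_natCast_add, PySem.List.pyRange_one]
  have hT : (((T : Int) + 1) - 1).toNat = T := by omega
  rw [hT, List.map_map, List.range_eq_range']
  rw [← List.map_drop, ← List.map_take]
  rw [List.drop_range']
  simp only [Nat.mul_one, Nat.zero_add]
  rw [List.take_range'_of_length_ge (by omega)]
  rw [join_empty_flatten]
  exact flatten_range'_chunk i s

-- B's partition loop over lengths i, …, 1 from offset s also produces rowsFrom i (s+1)
theorem outerB_eq (T : Nat) (i : Nat) : ∀ (acc : List (List Char)) (s : Nat), s + tri i ≤ T →
    (PySem.List.pyRange (i : Int) 0 (-1)).foldl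
      (fun (acc : List (List Char) × Int) len =>
        (acc.1 ++ [PySem.Chars.join []
            (PySem.List.slice (((PySem.List.pyRange 1 ((T : Int) + 1) 1).map pad02))
              (some acc.2) (some (acc.2 + len)))],
         acc.2 + len)) (acc, (s : Int))
      = (acc ++ rowsFrom i ((s : Int) + 1), ((s + tri i : Nat) : Int)) := by
  induction i with
  | zero => intro acc s h; simp [PySem.List.pyRange_neg_one_eq_nil, rowsFrom, tri]
  | succ m ih =>
    intro acc s h
    rw [PySem.List.pyRange_neg_one_cons (by exact_mod_cast Nat.succ_pos m)]
    have hm : ((m + 1 : Nat) : Int) - 1 = (m : Int) := by push_cast; ring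
    simp only [List.foldl, hm]
    rw [sliceJoin T s (m + 1) (by have := tri_succ m; omega)]
    have hcast : (s : Int) + ((m + 1 : Nat) : Int) = ((s + (m + 1) : Nat) : Int) := by push_cast; ring
    rw [hcast]
    rw [ih (acc ++ [chunk ((s : Int) + 1) (m + 1)]) (s + (m + 1)) (by have := tri_succ m; omega)]
    simp only [Prod.mk.injEq]
    constructor
    · have hv : ((s + (m+1) : Nat) : Int) + 1 = ((s:Int) + 1) + ((m:Int) + 1) := by push_cast; ring
      simp only [List.append_assoc, List.singleton_append, rowsFrom, hv]
    · congr 1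
      have := tri_succ m; omega

-- ===== VERDICT (by name: the statement is the Claim_ definition above) =====
theorem generate_triangle_spec : Claim_equal_generate_triangle := by
  intro n _
  show generate_triangle n = generate_triangle_alt n
  unfold generate_triangle generate_triangle_alt
  by_cases hn : n ≤ 0
  · rw [PySem.List.pyRange_neg_one_eq_nil hn]; rfl
  · obtain ⟨i, rfl⟩ : ∃ i : Nat, n = (i : Int) := ⟨n.toNat, by omega⟩
    have htot : PySem.Int.floordiv (max ((i:Int)) 0 * (max ((i:Int)) 0 + 1)) 2 = ((tri i : Nat) : Int) := by
      have hm : max ((i:Int)) 0 = (i:Int) := by omega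
      have h1 : (i:Int) * ((i:Int) + 1) = ((i * (i + 1) : Nat) : Int) := by push_cast; ring
      rw [hm, h1]
      exact_mod_cast PySem.Int.floordiv_natCast (i * (i+1)) 2
    simp only [htot]
    rw [outerA_eq i [] 1]
    have hB := outerB_eq (tri i) i [] 0 (by omega)
    simp only [Nat.cast_zero] at hB
    rw [hB]
    norm_num
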